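-- pv_equiv track=rewrite | github.com/ViennaRNA/forgi | tess/model/coarse_grain.py | remove_hetatm
-- ===== SOURCE A (Python) =====
-- def remove_hetatm(lines):
--     '''
--     Go through the lines of a pdb file and remove any which refer to a
--     HETATM.
--
--     @param lines: A an array of lines of text from a pdb file.
--     '''
--     new_lines = []
--
--     for line in lines:
--         if line.find('HETATM') == 0:
--             if line.find('5MU') > 0:
--                 line = line.replace('5MU', '  U')
--             elif line.find('PSU') > 0:
--                 line = line.replace('PSU', '  U')
--             elif line.find('5MC') > 0:
--                 line = line.replace('5MC', '  C')
--             elif line.find('1MG') > 0: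
--                 line = line.replace('1MG', '  G')
--             elif line.find('H2U') > 0:
--                 line = line.replace('H2U', '  G')
--             else:
--                 continue
--
--         line = line.replace('HETATM', 'ATOM  ')
--         new_lines += [line]
--
--     return new_lines
-- ===== SOURCE B (Python) =====
-- _REPL = {'5MU': '  U', 'PSU': '  U', '5MC': '  C', '1MG': '  G', 'H2U': '  G'}
--
-- def _leftmost_code(line):
--     """Leftmost 3-char window of line that is a known residue code, or None."""
--     for k in range(len(line)):
--         if line[k:k + 3] in _REPL:
--             return line[k:k + 3]
--     return None
--
-- def remove_hetatm(lines):
--     new_lines = []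
--     for line in lines:
--         if line.startswith('HETATM'):
--             code = _leftmost_code(line)
--             if code is None:
--                 continue
--             line = line.replace(code, _REPL[code])
--         new_lines.append(line.replace('HETATM', 'ATOM  '))
--     return new_lines
-- ===== Notes on version B (the rewrite author's own statement) =====
-- stated objective: alternative
-- what changed: Instead of A's five ordered substring searches (elif cascade over the code table), B makes a single left-to-right scan of each HETATM line, testing each 3-character window for membership in a code->replacement dict and replacing the leftmost code found.
-- outside the precondition, e.g. on remove_hetatm(['HETATM PSU 5MU']): A returns ['ATOM   PSU   U'], B returns ['ATOM     U 5MU']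
import Mathlib
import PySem

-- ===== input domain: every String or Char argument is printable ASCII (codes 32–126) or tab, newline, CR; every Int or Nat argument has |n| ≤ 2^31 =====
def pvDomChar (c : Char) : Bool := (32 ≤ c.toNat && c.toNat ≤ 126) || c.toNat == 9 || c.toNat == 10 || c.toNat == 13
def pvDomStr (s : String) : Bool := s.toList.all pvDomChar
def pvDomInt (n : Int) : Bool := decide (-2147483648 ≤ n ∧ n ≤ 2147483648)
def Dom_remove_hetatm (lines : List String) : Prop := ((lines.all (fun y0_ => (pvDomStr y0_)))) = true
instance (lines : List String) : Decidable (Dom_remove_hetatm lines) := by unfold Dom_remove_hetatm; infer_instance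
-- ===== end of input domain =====

-- B replaces A's five ordered substring searches (the elif cascade) by ONE left-to-right
-- scan of each HETATM line, testing 3-character windows against a code→replacement dict
-- and rewriting the leftmost code found (alternative algorithm; same return value on Pre_).

-- ===== PORT A =====
-- literal transliteration of A's loop: accumulator, elif cascade, `continue` keeps acc
def remove_hetatm (lines : List String) : List String :=
  lines.foldl (fun new_lines line =>
    if PySem.Str.find line "HETATM" = 0 then
      if PySem.Str.find line "5MU" > 0 then
        new_lines ++ [PySem.Str.replace (PySem.Str.replace line "5MU" "  U") "HETATM" "ATOM  "]
      else if PySem.Str.find line "PSU" > 0 then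
        new_lines ++ [PySem.Str.replace (PySem.Str.replace line "PSU" "  U") "HETATM" "ATOM  "]
      else if PySem.Str.find line "5MC" > 0 then
        new_lines ++ [PySem.Str.replace (PySem.Str.replace line "5MC" "  C") "HETATM" "ATOM  "]
      else if PySem.Str.find line "1MG" > 0 then
        new_lines ++ [PySem.Str.replace (PySem.Str.replace line "1MG" "  G") "HETATM" "ATOM  "]
      else if PySem.Str.find line "H2U" > 0 then
        new_lines ++ [PySem.Str.replace (PySem.Str.replace line "H2U" "  G") "HETATM" "ATOM  "]
      else new_lines
    else new_lines ++ [PySem.Str.replace line "HETATM" "ATOM  "]) []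

-- ===== PORT B =====
-- the dict _REPL of Source B
def hetRepl : PySem.Dict String String :=
  PySem.Dict.ofList [("5MU", "  U"), ("PSU", "  U"), ("5MC", "  C"), ("1MG", "  G"), ("H2U", "  G")]

-- _leftmost_code: for k in range(len(line)): if line[k:k+3] in _REPL: return line[k:k+3]
def leftmostCode (line : String) : Option String :=
  (PySem.List.pyRange 0 (PySem.Str.len line) 1).findSome? (fun k =>
    if PySem.Dict.contains hetRepl (PySem.Str.slice line (some k) (some (k + 3))) then
      some (PySem.Str.slice line (some k) (some (k + 3)))
    else none)

def remove_hetatm_alt (lines : List String) : List String :=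
  lines.foldl (fun new_lines line =>
    if PySem.Str.startswith line "HETATM" then
      match leftmostCode line with
      | none => new_lines
      | some code =>
          new_lines ++ [PySem.Str.replace
            (PySem.Str.replace line code (PySem.Dict.getD hetRepl code ""))
            "HETATM" "ATOM  "]
    else new_lines ++ [PySem.Str.replace line "HETATM" "ATOM  "]) []

-- ===== PRECONDITION & SPEC =====
def hetCodes : List String := ["5MU", "PSU", "5MC", "1MG", "H2U"]

-- Pre_ excludes lines starting with 'HETATM' that contain more than one DISTINCT residue
-- code: there A's fixed elif order and B's leftmost-in-line choice are both defensible
-- resolutions of an unspecified corner (real PDB lines name a single residue).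
def Pre_remove_hetatm (lines : List String) : Prop :=
  ∀ l ∈ lines, PySem.Str.startswith l "HETATM" = true →
    hetCodes.countP (fun c => decide (0 ≤ PySem.Str.find l c)) ≤ 1
instance (lines : List String) : Decidable (Pre_remove_hetatm lines) := by
  unfold Pre_remove_hetatm; infer_instance

def pvWitness_remove_hetatm : List String := ["HETATM    1  N1  5MU A   1", "ATOM      2  C2  G A    2"]

def Spec_remove_hetatm (lines : List String) (out : List String) : Prop := out = remove_hetatm_alt lines
instance (lines : List String) (out : List String) : Decidable (Spec_remove_hetatm lines out) := by unfold Spec_remove_hetatm; infer_instance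

-- ===== CLAIM (what is proved, stated in full; the proofs are below) =====
def Claim_equal_remove_hetatm : Prop := ∀ (lines : List String), Dom_remove_hetatm lines → Pre_remove_hetatm lines → Spec_remove_hetatm lines (remove_hetatm lines)

-- ===== LEMMAS AND PROOFS =====

-- the five residue codes, on the character-list side
def isCode (w : List Char) : Bool :=
  w == ['5','M','U'] || w == ['P','S','U'] || w == ['5','M','C'] || w == ['1','M','G'] || w == ['H','2','U']

-- list-side view of Source B's scan: first 3-char window that is a code, walking the suffixes
def scanChars : List Char → Option (List Char)
  | [] => none
  | c :: rest =>
      if isCode ((c :: rest).take 3) then some ((c :: rest).take 3) else scanChars rest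

theorem contains_hetRepl (w : String) :
    PySem.Dict.contains hetRepl w = isCode w.toList := by
  have h : hetRepl = PySem.Dict.mk [("5MU","  U"),("PSU","  U"),("5MC","  C"),("1MG","  G"),("H2U","  G")] := by decide
  rw [h]
  have hx : ∀ (a : String), (a == w) = (w.toList == a.toList) := by
    intro a
    by_cases hq : a = w
    · subst hq; simp
    · simp [hq, String.toList_inj, Ne.symm hq]
  simp [PySem.Dict.contains, isCode, hx, Bool.or_assoc]

-- Source B's index scan over range(len(line)) computes scanChars of the suffix
theorem slice_window (s : List Char) (k : Nat) :
    PySem.List.slice s (some (k : Int)) (some ((k : Int) + 3)) = (s.drop k).take 3 := by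
  have := PySem.List.slice_natCast_add (xs := s) (j := k) (n := 3)
  simpa using this

theorem findSome?_eq_scanChars (s : List Char) (k : Nat) (hk : k ≤ s.length) :
    ((PySem.List.pyRange k s.length 1).findSome? (fun i =>
      if isCode (PySem.List.slice s (some i) (some (i + 3))) then
        some (PySem.List.slice s (some i) (some (i + 3)))
      else none))
    = scanChars (s.drop k) := by
  induction hn : s.length - k generalizing k with
  | zero =>
    have hke : k = s.length := by omega
    subst hke
    rw [PySem.List.pyRange_one_eq_nil (by omega)]
    simp [scanChars, List.drop_length]
  | succ n ih =>
    have hlt : k < s.length := by omega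
    rw [PySem.List.pyRange_one_cons (by exact_mod_cast hlt)]
    rw [List.findSome?_cons]
    rw [List.drop_eq_getElem_cons hlt]
    simp only [scanChars]
    rw [← List.drop_eq_getElem_cons hlt, slice_window]
    by_cases hc : isCode ((s.drop k).take 3) = true
    · rw [if_pos hc, if_pos hc]
    · rw [if_neg hc, if_neg hc]
      have : ((k : Int) + 1) = ((k + 1 : Nat) : Int) := by push_cast; ring
      rw [this]
      exact ih (k + 1) (by omega) (by omega)

theorem findSome?_map {α β γ : Type} (l : List α) (f : α → Option β) (h : β → γ) :
    l.findSome? (fun x => (f x).map h) = (l.findSome? f).map h := by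
  induction l with
  | nil => rfl
  | cons a t ih =>
    simp only [List.findSome?_cons]
    cases f a <;> simp [ih]

theorem leftmostCode_eq (line : String) :
    leftmostCode line = (scanChars line.toList).map String.ofList := by
  rw [leftmostCode]
  have hb : ∀ k : Int,
      (if PySem.Dict.contains hetRepl (PySem.Str.slice line (some k) (some (k + 3))) then
        some (PySem.Str.slice line (some k) (some (k + 3)))
      else none)
      = ((if isCode (PySem.List.slice line.toList (some k) (some (k + 3))) then
          some (PySem.List.slice line.toList (some k) (some (k + 3)))
        else none).map String.ofList) := by
    intro k
    rw [contains_hetRepl]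
    have htl : (PySem.Str.slice line (some k) (some (k + 3))).toList
        = PySem.List.slice line.toList (some k) (some (k + 3)) := by
      simp [PySem.Str.toList_slice]
    rw [htl]
    by_cases hc : isCode (PySem.List.slice line.toList (some k) (some (k + 3))) = true
    · rw [if_pos hc, if_pos hc, Option.map_some, ← htl, String.ofList_toList]
    · rw [if_neg hc, if_neg hc]
      rfl
  rw [funext hb, findSome?_map]
  have hlen : PySem.Str.len line = (line.toList.length : Int) := by simp
  rw [hlen]
  have h0 : ((0 : Nat) : Int) = 0 := rfl
  rw [← h0, findSome?_eq_scanChars line.toList 0 (by omega)]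
  simp

theorem isCode_length {w : List Char} (h : isCode w = true) : w.length = 3 := by
  simp [isCode] at h
  rcases h with (((h|h)|h)|h)|h <;> subst h <;> rfl

theorem isCode_of_prefix {w l : List Char} (h : isCode w = true) (hp : w <+: l) :
    l.take 3 = w := by
  have := List.prefix_iff_eq_take.mp hp
  rw [isCode_length h] at this
  exact this.symm

theorem scanChars_eq_none_iff (l : List Char) :
    scanChars l = none ↔ ∀ w, isCode w = true → ¬ w <:+: l := by
  induction l with
  | nil =>
    simp only [scanChars, true_iff]
    intro w hw hin
    rw [List.infix_nil] at hin
    subst hin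
    simp [isCode] at hw
  | cons c rest ih =>
    simp only [scanChars]
    by_cases h : isCode ((c :: rest).take 3) = true
    · rw [if_pos h]
      simp only [reduceCtorEq, false_iff, not_forall]
      push Not
      exact ⟨_, h, (List.take_prefix 3 (c :: rest)).isInfix⟩
    · rw [if_neg h, ih]
      constructor
      · intro hall w hw hin
        rcases List.infix_cons_iff.mp hin with hp | hi
        · exact h (isCode_of_prefix hw hp ▸ hw)
        · exact hall w hw hi
      · intro hall w hw hin
        exact hall w hw (List.infix_cons hin)

theorem scanChars_eq_some_of_unique {l X : List Char} (hX : isCode X = true)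
    (hin : X <:+: l) (huniq : ∀ w, isCode w = true → w <:+: l → w = X) :
    scanChars l = some X := by
  induction l with
  | nil =>
    rw [List.infix_nil] at hin
    subst hin
    simp [isCode] at hX
  | cons c rest ih =>
    simp only [scanChars]
    by_cases hc : isCode ((c :: rest).take 3) = true
    · rw [if_pos hc]
      exact congrArg some (huniq _ hc (List.take_prefix 3 (c :: rest)).isInfix)
    · rw [if_neg hc]
      have hXn : ¬ X <+: c :: rest := fun hp => hc (isCode_of_prefix hX hp ▸ hX)
      rcases List.infix_cons_iff.mp hin with hp | hi
      · exact absurd hp hXn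
      · exact ih hi (fun w hw hwin => huniq w hw (List.infix_cons hwin))

-- `line.find(p) == 0` is exactly `line.startswith(p)`
theorem find_eq_zero_iff_startswith (s p : String) :
    PySem.Str.find s p = 0 ↔ PySem.Str.startswith s p = true := by
  simp only [PySem.Str.find_eq, PySem.Str.startswith_eq, PySem.Chars.startswith_iff]
  constructor
  · intro h
    have h0 : (0 : Int) ≤ PySem.Chars.find s.toList p.toList := by omega
    have := (PySem.Chars.find_spec (s := s.toList) (sub := p.toList) h0).1
    simpa [h] using this
  · intro h
    have hnn : (0 : Int) ≤ PySem.Chars.find s.toList p.toList :=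
      (PySem.Chars.find_nonneg_iff _ _).mpr h.isInfix
    rcases (PySem.Chars.find_spec (s := s.toList) (sub := p.toList) hnn) with ⟨_, hmin⟩
    by_contra hne
    have hpos : 0 < (PySem.Chars.find s.toList p.toList).toNat := by omega
    exact hmin 0 hpos (by simpa using h)

-- a HETATM line cannot START with a residue code
theorem no_code_prefix {l w : List Char} (hs : ['H','E','T','A','T','M'] <+: l)
    (hw : isCode w = true) (hp : w <+: l) : False := by
  have h36 : w.length ≤ (['H','E','T','A','T','M'] : List Char).length := by
    rw [isCode_length hw]; decide
  have hwh : w <+: ['H','E','T','A','T','M'] := List.prefix_of_prefix_length_le hp hs h36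
  have : w = ['H','E','T'] := by
    have := List.prefix_iff_eq_take.mp hwh
    rw [isCode_length hw] at this
    simpa using this
  subst this
  simp [isCode] at hw

theorem startswith_HET {line : String} (hs : PySem.Str.startswith line "HETATM" = true) :
    ['H','E','T','A','T','M'] <+: line.toList := by
  simp only [PySem.Str.startswith_eq, PySem.Chars.startswith_iff] at hs
  exact hs

-- for a HETATM line, find(code) > 0 ↔ the code occurs in the line
theorem find_pos_iff {line : String} (hs : PySem.Str.startswith line "HETATM" = true)
    {c : String} (hc : isCode c.toList = true) :
    PySem.Str.find line c > 0 ↔ c.toList <:+: line.toList := by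
  constructor
  · intro h
    exact (PySem.Str.find_nonneg_iff _ _).mp (by omega)
  · intro h
    have h0 : (0 : Int) ≤ PySem.Str.find line c := (PySem.Str.find_nonneg_iff _ _).mpr h
    have hne : PySem.Str.find line c ≠ 0 := by
      intro he
      have hsw := (find_eq_zero_iff_startswith line c).mp he
      simp only [PySem.Str.startswith_eq, PySem.Chars.startswith_iff] at hsw
      exact no_code_prefix (startswith_HET hs) hc hsw
    omega

-- per-line equality of the two loop bodies, under the per-line precondition
theorem body_eq (acc : List String) (line : String)
    (hpre : PySem.Str.startswith line "HETATM" = true →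
      hetCodes.countP (fun c => decide (0 ≤ PySem.Str.find line c)) ≤ 1) :
    (if PySem.Str.find line "HETATM" = 0 then
      if PySem.Str.find line "5MU" > 0 then
        acc ++ [PySem.Str.replace (PySem.Str.replace line "5MU" "  U") "HETATM" "ATOM  "]
      else if PySem.Str.find line "PSU" > 0 then
        acc ++ [PySem.Str.replace (PySem.Str.replace line "PSU" "  U") "HETATM" "ATOM  "]
      else if PySem.Str.find line "5MC" > 0 then
        acc ++ [PySem.Str.replace (PySem.Str.replace line "5MC" "  C") "HETATM" "ATOM  "]
      else if PySem.Str.find line "1MG" > 0 then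
        acc ++ [PySem.Str.replace (PySem.Str.replace line "1MG" "  G") "HETATM" "ATOM  "]
      else if PySem.Str.find line "H2U" > 0 then
        acc ++ [PySem.Str.replace (PySem.Str.replace line "H2U" "  G") "HETATM" "ATOM  "]
      else acc
    else acc ++ [PySem.Str.replace line "HETATM" "ATOM  "])
    =
    (if PySem.Str.startswith line "HETATM" then
      match leftmostCode line with
      | none => acc
      | some code =>
          acc ++ [PySem.Str.replace
            (PySem.Str.replace line code (PySem.Dict.getD hetRepl code ""))
            "HETATM" "ATOM  "]
    else acc ++ [PySem.Str.replace line "HETATM" "ATOM  "]) := by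
  by_cases hs : PySem.Str.startswith line "HETATM" = true
  · have hf0 : PySem.Str.find line "HETATM" = 0 := (find_eq_zero_iff_startswith _ _).mpr hs
    rw [if_pos hf0, if_pos hs, leftmostCode_eq]
    specialize hpre hs
    simp only [hetCodes, List.countP_cons, List.countP_nil, decide_eq_true_eq] at hpre
    have g1 := find_pos_iff hs (c := "5MU") (by rfl)
    have g2 := find_pos_iff hs (c := "PSU") (by rfl)
    have g3 := find_pos_iff hs (c := "5MC") (by rfl)
    have g4 := find_pos_iff hs (c := "1MG") (by rfl)
    have g5 := find_pos_iff hs (c := "H2U") (by rfl)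
    have i1 : ((0:Int) ≤ PySem.Str.find line "5MU") ↔ (['5','M','U'] <:+: line.toList) :=
      PySem.Str.find_nonneg_iff line "5MU"
    have i2 : ((0:Int) ≤ PySem.Str.find line "PSU") ↔ (['P','S','U'] <:+: line.toList) :=
      PySem.Str.find_nonneg_iff line "PSU"
    have i3 : ((0:Int) ≤ PySem.Str.find line "5MC") ↔ (['5','M','C'] <:+: line.toList) :=
      PySem.Str.find_nonneg_iff line "5MC"
    have i4 : ((0:Int) ≤ PySem.Str.find line "1MG") ↔ (['1','M','G'] <:+: line.toList) :=
      PySem.Str.find_nonneg_iff line "1MG"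
    have i5 : ((0:Int) ≤ PySem.Str.find line "H2U") ↔ (['H','2','U'] <:+: line.toList) :=
      PySem.Str.find_nonneg_iff line "H2U"
    by_cases h1 : ['5','M','U'] <:+: line.toList
    · have h2 : ¬ ['P','S','U'] <:+: line.toList := by
        intro h2
        have ea := i1.mpr h1
        have eb := i2.mpr h2
        split_ifs at hpre <;> omega
      have h3 : ¬ ['5','M','C'] <:+: line.toList := by
        intro h3
        have ea := i1.mpr h1
        have eb := i3.mpr h3
        split_ifs at hpre <;> omega
      have h4 : ¬ ['1','M','G'] <:+: line.toList := by
        intro h4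
        have ea := i1.mpr h1
        have eb := i4.mpr h4
        split_ifs at hpre <;> omega
      have h5 : ¬ ['H','2','U'] <:+: line.toList := by
        intro h5
        have ea := i1.mpr h1
        have eb := i5.mpr h5
        split_ifs at hpre <;> omega
      rw [if_pos (g1.mpr h1)]
      have hsome : scanChars line.toList = some ['5','M','U'] := by
        apply scanChars_eq_some_of_unique (by rfl) h1
        intro w hw hin
        simp [isCode] at hw
        rcases hw with (((hw|hw)|hw)|hw)|hw <;> subst hw
        · rfl
        · exact absurd hin h2
        · exact absurd hin h3
        · exact absurd hin h4
        · exact absurd hin h5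
      rw [hsome]
      rfl
    · rw [if_neg (fun hg => h1 (g1.mp hg))]
      by_cases h2 : ['P','S','U'] <:+: line.toList
      · have h3 : ¬ ['5','M','C'] <:+: line.toList := by
          intro h3
          have ea := i2.mpr h2
          have eb := i3.mpr h3
          split_ifs at hpre <;> omega
        have h4 : ¬ ['1','M','G'] <:+: line.toList := by
          intro h4
          have ea := i2.mpr h2
          have eb := i4.mpr h4
          split_ifs at hpre <;> omega
        have h5 : ¬ ['H','2','U'] <:+: line.toList := by
          intro h5
          have ea := i2.mpr h2
          have eb := i5.mpr h5
          split_ifs at hpre <;> omega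
        rw [if_pos (g2.mpr h2)]
        have hsome : scanChars line.toList = some ['P','S','U'] := by
          apply scanChars_eq_some_of_unique (by rfl) h2
          intro w hw hin
          simp [isCode] at hw
          rcases hw with (((hw|hw)|hw)|hw)|hw <;> subst hw
          · exact absurd hin h1
          · rfl
          · exact absurd hin h3
          · exact absurd hin h4
          · exact absurd hin h5
        rw [hsome]
        rfl
      · rw [if_neg (fun hg => h2 (g2.mp hg))]
        by_cases h3 : ['5','M','C'] <:+: line.toList
        · have h4 : ¬ ['1','M','G'] <:+: line.toList := by
            intro h4
            have ea := i3.mpr h3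
            have eb := i4.mpr h4
            split_ifs at hpre <;> omega
          have h5 : ¬ ['H','2','U'] <:+: line.toList := by
            intro h5
            have ea := i3.mpr h3
            have eb := i5.mpr h5
            split_ifs at hpre <;> omega
          rw [if_pos (g3.mpr h3)]
          have hsome : scanChars line.toList = some ['5','M','C'] := by
            apply scanChars_eq_some_of_unique (by rfl) h3
            intro w hw hin
            simp [isCode] at hw
            rcases hw with (((hw|hw)|hw)|hw)|hw <;> subst hw
            · exact absurd hin h1
            · exact absurd hin h2
            · rfl
            · exact absurd hin h4
            · exact absurd hin h5
          rw [hsome]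
          rfl
        · rw [if_neg (fun hg => h3 (g3.mp hg))]
          by_cases h4 : ['1','M','G'] <:+: line.toList
          · have h5 : ¬ ['H','2','U'] <:+: line.toList := by
              intro h5
              have ea := i4.mpr h4
              have eb := i5.mpr h5
              split_ifs at hpre <;> omega
            rw [if_pos (g4.mpr h4)]
            have hsome : scanChars line.toList = some ['1','M','G'] := by
              apply scanChars_eq_some_of_unique (by rfl) h4
              intro w hw hin
              simp [isCode] at hw
              rcases hw with (((hw|hw)|hw)|hw)|hw <;> subst hw
              · exact absurd hin h1
              · exact absurd hin h2
              · exact absurd hin h3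
              · rfl
              · exact absurd hin h5
            rw [hsome]
            rfl
          · rw [if_neg (fun hg => h4 (g4.mp hg))]
            by_cases h5 : ['H','2','U'] <:+: line.toList
            · rw [if_pos (g5.mpr h5)]
              have hsome : scanChars line.toList = some ['H','2','U'] := by
                apply scanChars_eq_some_of_unique (by rfl) h5
                intro w hw hin
                simp [isCode] at hw
                rcases hw with (((hw|hw)|hw)|hw)|hw <;> subst hw
                · exact absurd hin h1
                · exact absurd hin h2
                · exact absurd hin h3
                · exact absurd hin h4
                · rfl
              rw [hsome]
              rfl
            · rw [if_neg (fun hg => h5 (g5.mp hg))]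
              have hnone : scanChars line.toList = none := by
                apply (scanChars_eq_none_iff _).mpr
                intro w hw hin
                simp [isCode] at hw
                rcases hw with (((hw|hw)|hw)|hw)|hw <;> subst hw
                · exact h1 hin
                · exact h2 hin
                · exact h3 hin
                · exact h4 hin
                · exact h5 hin
              rw [hnone]
              rfl
  · have hf : ¬ PySem.Str.find line "HETATM" = 0 :=
      fun h => hs ((find_eq_zero_iff_startswith _ _).mp h)
    rw [if_neg hf, if_neg hs]

-- ===== VERDICT (by name: the statement is the Claim_ definition above) =====
theorem remove_hetatm_spec : Claim_equal_remove_hetatm := by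
  intro lines _ hpre
  show remove_hetatm lines = remove_hetatm_alt lines
  rw [remove_hetatm, remove_hetatm_alt]
  apply PySem.List.foldl_congr_mem
  intro acc l hl
  exact body_eq acc l (hpre l hl)
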